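-- pv_equiv track=rewrite | github.com/neutrak/ipfire_scripts | firewall/ip_rangemask.py | shared_bits_in_byte
-- ===== SOURCE A (Python) =====
-- def shared_bits_in_byte(byte_a,byte_b):
-- 	shared_bits=0
-- 	#check each bit, and see if it is shared
-- 	#stop on a non-shared bit
-- 	for bit in [7,6,5,4,3,2,1,0]:
-- 		if(((byte_a>>bit)&1) != ((byte_b>>bit)&1)):
-- 			break
-- 		else:
-- 			shared_bits+=1
-- 	return shared_bits
-- ===== SOURCE B (Python) =====
-- def shared_bits_in_byte(byte_a, byte_b):
--     diff = (byte_a ^ byte_b) & 0xFF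
--     return 8 if diff == 0 else 8 - diff.bit_length()
-- ===== Notes on version B (the rewrite author's own statement) =====
-- stated objective: simpler
-- what changed: Replaces the per-bit loop with a closed form: XOR the bytes, mask to 8 bits, and read the shared leading-bit count off the difference's bit_length.
import Mathlib
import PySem

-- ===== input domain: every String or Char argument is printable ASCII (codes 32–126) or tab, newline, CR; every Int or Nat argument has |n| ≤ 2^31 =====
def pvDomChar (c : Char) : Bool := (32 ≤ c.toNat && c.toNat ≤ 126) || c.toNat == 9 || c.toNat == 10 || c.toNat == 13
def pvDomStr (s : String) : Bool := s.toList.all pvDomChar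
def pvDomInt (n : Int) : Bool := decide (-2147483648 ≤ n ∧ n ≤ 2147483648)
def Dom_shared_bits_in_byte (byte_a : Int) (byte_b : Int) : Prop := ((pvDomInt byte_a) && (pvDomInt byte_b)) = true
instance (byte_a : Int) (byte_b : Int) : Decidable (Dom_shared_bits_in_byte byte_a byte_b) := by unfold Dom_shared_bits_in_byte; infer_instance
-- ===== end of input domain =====

-- B replaces A's per-bit loop by one XOR + mask + bit_length (a closed form); equivalence is proved on all ints.

-- ===== PORT A =====
-- the for-loop over [7,6,…,0] with break, as structural recursion over the same list
def sbLoop (byte_a : Int) (byte_b : Int) : List Nat → Int → Int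
  | [], shared_bits => shared_bits
  | bit :: rest, shared_bits =>
    if PySem.Int.band (byte_a >>> bit) 1 ≠ PySem.Int.band (byte_b >>> bit) 1 then shared_bits
    else sbLoop byte_a byte_b rest (shared_bits + 1)

def shared_bits_in_byte (byte_a : Int) (byte_b : Int) : Int :=
  sbLoop byte_a byte_b [7, 6, 5, 4, 3, 2, 1, 0] 0

-- ===== PORT B =====
def shared_bits_in_byte_alt (byte_a : Int) (byte_b : Int) : Int :=
  let diff := PySem.Int.band (PySem.Int.bxor byte_a byte_b) 255
  if diff = 0 then 8 else 8 - (PySem.Int.bitLength diff : Int)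

-- ===== PRECONDITION & SPEC =====
def Spec_shared_bits_in_byte (byte_a : Int) (byte_b : Int) (out : Int) : Prop := out = shared_bits_in_byte_alt byte_a byte_b
instance (byte_a : Int) (byte_b : Int) (out : Int) : Decidable (Spec_shared_bits_in_byte byte_a byte_b out) := by unfold Spec_shared_bits_in_byte; infer_instance

-- ===== CLAIM (what is proved, stated in full; the proofs are below) =====
def Claim_equal_shared_bits_in_byte : Prop := ∀ (byte_a : Int) (byte_b : Int), Dom_shared_bits_in_byte byte_a byte_b → Spec_shared_bits_in_byte byte_a byte_b (shared_bits_in_byte byte_a byte_b)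

-- ===== LEMMAS AND PROOFS =====
set_option maxRecDepth 8192

theorem xA1 (x y z : Nat) : x ^^^ (y ^^^ z) = (x ^^^ y) ^^^ z := (Nat.xor_assoc x y z).symm

theorem xA2 (x y z : Nat) : (x ^^^ z) ^^^ y = (x ^^^ y) ^^^ z := by
  rw [Nat.xor_assoc, Nat.xor_comm z y, ← Nat.xor_assoc]

theorem xA3 (x y z : Nat) : (x ^^^ z) ^^^ (y ^^^ z) = x ^^^ y := by
  rw [xA1, xA2 x y z, Nat.xor_assoc, Nat.xor_self, Nat.xor_zero]

-- Python's `x & 1` after a right shift only looks at one bit: it equals (x / 2^k) % 2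
theorem condEq (a : Int) (k : Nat) (hk : k < 8) :
    PySem.Int.band (a >>> k) 1 = PySem.Int.band ((a % 256) >>> k) 1 := by
  rw [PySem.Int.band_one, PySem.Int.band_one, Int.shiftRight_eq_div_pow, Int.shiftRight_eq_div_pow]
  show Int.fmod _ 2 = Int.fmod _ 2
  rw [Int.fmod_eq_emod, Int.fmod_eq_emod]
  interval_cases k <;> norm_num <;> omega

-- A only reads bits 0–7: it depends on the arguments only through their residues mod 256
theorem AReduce (a b : Int) :
    shared_bits_in_byte a b = shared_bits_in_byte (a % 256) (b % 256) := by
  simp only [shared_bits_in_byte, sbLoop]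
  rw [condEq a 7 (by omega), condEq b 7 (by omega), condEq a 6 (by omega), condEq b 6 (by omega),
      condEq a 5 (by omega), condEq b 5 (by omega), condEq a 4 (by omega), condEq b 4 (by omega),
      condEq a 3 (by omega), condEq b 3 (by omega), condEq a 2 (by omega), condEq b 2 (by omega),
      condEq a 1 (by omega), condEq b 1 (by omega), condEq a 0 (by omega), condEq b 0 (by omega)]

-- Python's `x & 255` is x mod 256, also for negative x
theorem maskPy (x : Int) : PySem.Int.band x 255 = x % 256 := by
  by_cases hx : 0 ≤ x
  · rw [PySem.Int.band_of_nonneg hx (by norm_num)]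
    have : x.toNat &&& (255 : Int).toNat = x.toNat % 256 := by
      show x.toNat &&& (2 ^ 8 - 1) = _
      rw [Nat.and_two_pow_sub_one_eq_mod]
    rw [this]; omega
  · simp only [PySem.Int.band, if_neg hx, if_pos (by norm_num : (0:Int) ≤ 255)]
    have : (255 : Int).toNat &&& (-x - 1).toNat = (-x - 1).toNat % 256 := by
      rw [Nat.land_comm]
      show (-x - 1).toNat &&& (2 ^ 8 - 1) = _
      rw [Nat.and_two_pow_sub_one_eq_mod]
    rw [this]; omega

-- 8-bit complement: for y < 256, 255 - y = y ^^^ 255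
theorem compl8 (y : Nat) (hy : y < 256) : 255 - y = y ^^^ 255 := by
  have h : ∀ z : Fin 256, 255 - z.val = z.val ^^^ 255 := by decide
  exact h ⟨y, hy⟩

-- XOR commutes with reduction mod 256
theorem xorMod (a b : Int) :
    PySem.Int.bxor a b % 256 = PySem.Int.bxor (a % 256) (b % 256) % 256 := by
  have ha' : 0 ≤ a % 256 := Int.emod_nonneg a (by norm_num)
  have hb' : 0 ≤ b % 256 := Int.emod_nonneg b (by norm_num)
  have ha'' : a % 256 < 256 := Int.emod_lt_of_pos a (by norm_num)
  have hb'' : b % 256 < 256 := Int.emod_lt_of_pos b (by norm_num)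
  rw [PySem.Int.bxor_of_nonneg ha' hb']
  have hxlt : (a % 256).toNat ^^^ (b % 256).toNat < 256 :=
    Nat.xor_lt_two_pow (n := 8) (by omega) (by omega)
  by_cases hA : 0 ≤ a <;> by_cases hB : 0 ≤ b
  · simp only [PySem.Int.bxor, if_pos hA, if_pos hB]
    have h1 : (a % 256).toNat = a.toNat % 256 := by omega
    have h2 : (b % 256).toNat = b.toNat % 256 := by omega
    have : (a.toNat ^^^ b.toNat) % 256 = (a % 256).toNat ^^^ (b % 256).toNat := by
      rw [h1, h2]; exact Nat.xor_mod_two_pow (n := 8)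
    omega
  · simp only [PySem.Int.bxor, if_pos hA, if_neg hB]
    have h1 : (a % 256).toNat = a.toNat % 256 := by omega
    have hc : (b % 256).toNat = ((-b - 1).toNat % 256) ^^^ 255 := by
      rw [show (b % 256).toNat = 255 - (-b - 1).toNat % 256 by omega]
      exact compl8 _ (by omega)
    have hm : (a.toNat ^^^ (-b - 1).toNat) % 256
        = (a.toNat % 256) ^^^ ((-b - 1).toNat % 256) := Nat.xor_mod_two_pow (n := 8)
    have hlt : (a.toNat % 256) ^^^ ((-b - 1).toNat % 256) < 256 :=
      Nat.xor_lt_two_pow (n := 8) (by omega) (by omega)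
    rw [h1, hc, xA1, ← compl8 _ hlt]
    omega
  · simp only [PySem.Int.bxor, if_neg hA, if_pos hB]
    have h1 : (b % 256).toNat = b.toNat % 256 := by omega
    have hc : (a % 256).toNat = ((-a - 1).toNat % 256) ^^^ 255 := by
      rw [show (a % 256).toNat = 255 - (-a - 1).toNat % 256 by omega]
      exact compl8 _ (by omega)
    have hm : ((-a - 1).toNat ^^^ b.toNat) % 256
        = ((-a - 1).toNat % 256) ^^^ (b.toNat % 256) := Nat.xor_mod_two_pow (n := 8)
    have hlt : ((-a - 1).toNat % 256) ^^^ (b.toNat % 256) < 256 :=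
      Nat.xor_lt_two_pow (n := 8) (by omega) (by omega)
    rw [h1, hc, xA2, ← compl8 _ hlt]
    omega
  · simp only [PySem.Int.bxor, if_neg hA, if_neg hB]
    have hc1 : (a % 256).toNat = ((-a - 1).toNat % 256) ^^^ 255 := by
      rw [show (a % 256).toNat = 255 - (-a - 1).toNat % 256 by omega]
      exact compl8 _ (by omega)
    have hc2 : (b % 256).toNat = ((-b - 1).toNat % 256) ^^^ 255 := by
      rw [show (b % 256).toNat = 255 - (-b - 1).toNat % 256 by omega]
      exact compl8 _ (by omega)
    have hm : ((-a - 1).toNat ^^^ (-b - 1).toNat) % 256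
        = ((-a - 1).toNat % 256) ^^^ ((-b - 1).toNat % 256) := Nat.xor_mod_two_pow (n := 8)
    rw [hc1, hc2, xA3]
    omega

-- B also depends only on the residues mod 256
theorem altReduce (a b : Int) :
    shared_bits_in_byte_alt a b = shared_bits_in_byte_alt (a % 256) (b % 256) := by
  simp only [shared_bits_in_byte_alt]
  rw [maskPy, maskPy, xorMod]

-- Nat.testBit as a div/mod formula
theorem testBit_div (n i : Nat) : n.testBit i = decide (n / 2 ^ i % 2 = 1) := by
  simp [Nat.testBit, Nat.shiftRight_eq_div_pow]
  rfl

-- A's loop condition at bit k is exactly bit k of the XOR of the two bytes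
theorem condBit (x y : Int) (hx : 0 ≤ x) (hy : 0 ≤ y) (k : Nat) :
    (PySem.Int.band (x >>> k) 1 ≠ PySem.Int.band (y >>> k) 1)
      ↔ Nat.testBit (x.toNat ^^^ y.toNat) k = true := by
  lift x to Nat using hx with m
  lift y to Nat using hy with p
  rw [PySem.Int.band_one, PySem.Int.band_one, Int.shiftRight_eq_div_pow, Int.shiftRight_eq_div_pow]
  show Int.fmod _ 2 ≠ Int.fmod _ 2 ↔ _
  have L1 : Int.fmod ((m : Int) / ((2 ^ k : Nat) : Int)) 2 = ((m / 2 ^ k % 2 : Nat) : Int) := by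
    rw [Int.fmod_eq_emod]; norm_num
  have L2 : Int.fmod ((p : Int) / ((2 ^ k : Nat) : Int)) 2 = ((p / 2 ^ k % 2 : Nat) : Int) := by
    rw [Int.fmod_eq_emod]; norm_num
  rw [L1, L2, Int.toNat_natCast, Int.toNat_natCast, Nat.testBit_xor, testBit_div, testBit_div]
  rcases Nat.mod_two_eq_zero_or_one (m / 2 ^ k) with h1 | h1 <;>
    rcases Nat.mod_two_eq_zero_or_one (p / 2 ^ k) with h2 | h2 <;>
      simp [h1, h2]

-- on residues (one byte each) the two programs agree
theorem residMain (x y : Int) (hx0 : 0 ≤ x) (hx1 : x < 256) (hy0 : 0 ≤ y) (hy1 : y < 256) :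
    shared_bits_in_byte x y = shared_bits_in_byte_alt x y := by
  have hnlt : x.toNat ^^^ y.toNat < 256 := Nat.xor_lt_two_pow (n := 8) (by omega) (by omega)
  set n := x.toNat ^^^ y.toNat with hn
  have hd : PySem.Int.band (PySem.Int.bxor x y) 255 = (n : Int) := by
    rw [PySem.Int.bxor_of_nonneg hx0 hy0, maskPy]; omega
  have hfalse : ∀ k, n < 2 ^ k → n.testBit k = false := fun k hk => Nat.testBit_eq_false_of_lt hk
  simp only [shared_bits_in_byte, sbLoop, shared_bits_in_byte_alt, hd,
    condBit x y hx0 hy0, ← hn]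
  by_cases h0 : n = 0
  · simp [h0]
  · have hub : n < 2 ^ PySem.Int.bitLength (n : Int) := by
      have := PySem.Int.lt_two_pow_bitLength (n : Int)
      simpa using this
    have hlb : 2 ^ (PySem.Int.bitLength (n : Int) - 1) ≤ n := by
      have := PySem.Int.two_pow_bitLength_le (n : Int) (by exact_mod_cast h0)
      simpa using this
    set L := PySem.Int.bitLength (n : Int) with hLdef
    have hL1 : 1 ≤ L := by
      by_contra h
      have : L = 0 := by omega
      rw [this] at hub; omega
    have hL8 : L ≤ 8 := by
      by_contra h
      have h8 : (8 : Nat) ≤ L - 1 := by omega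
      have h2 : (2 : Nat) ^ 8 ≤ 2 ^ (L - 1) := Nat.pow_le_pow_right (by norm_num) h8
      have h3 : (256 : Nat) ≤ n := le_trans h2 hlb
      omega
    interval_cases L
    · have ht : n.testBit 0 = true := by
        rw [testBit_div]; simp only [decide_eq_true_eq]; omega
      simp [hfalse 7 (by omega), hfalse 6 (by omega), hfalse 5 (by omega), hfalse 4 (by omega), hfalse 3 (by omega), hfalse 2 (by omega), hfalse 1 (by omega), ht, h0]
    · have ht : n.testBit 1 = true := by
        rw [testBit_div]; simp only [decide_eq_true_eq]; omega
      simp [hfalse 7 (by omega), hfalse 6 (by omega), hfalse 5 (by omega), hfalse 4 (by omega), hfalse 3 (by omega), hfalse 2 (by omega), ht, h0]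
    · have ht : n.testBit 2 = true := by
        rw [testBit_div]; simp only [decide_eq_true_eq]; omega
      simp [hfalse 7 (by omega), hfalse 6 (by omega), hfalse 5 (by omega), hfalse 4 (by omega), hfalse 3 (by omega), ht, h0]
    · have ht : n.testBit 3 = true := by
        rw [testBit_div]; simp only [decide_eq_true_eq]; omega
      simp [hfalse 7 (by omega), hfalse 6 (by omega), hfalse 5 (by omega), hfalse 4 (by omega), ht, h0]
    · have ht : n.testBit 4 = true := by
        rw [testBit_div]; simp only [decide_eq_true_eq]; omega
      simp [hfalse 7 (by omega), hfalse 6 (by omega), hfalse 5 (by omega), ht, h0]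
    · have ht : n.testBit 5 = true := by
        rw [testBit_div]; simp only [decide_eq_true_eq]; omega
      simp [hfalse 7 (by omega), hfalse 6 (by omega), ht, h0]
    · have ht : n.testBit 6 = true := by
        rw [testBit_div]; simp only [decide_eq_true_eq]; omega
      simp [hfalse 7 (by omega), ht, h0]
    · have ht : n.testBit 7 = true := by
        rw [testBit_div]; simp only [decide_eq_true_eq]; omega
      simp [ht, h0]

-- ===== VERDICT (by name: the statement is the Claim_ definition above) =====
theorem shared_bits_in_byte_spec : Claim_equal_shared_bits_in_byte := by
  intro a b _
  show shared_bits_in_byte a b = shared_bits_in_byte_alt a b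
  rw [AReduce, altReduce]
  exact residMain _ _ (Int.emod_nonneg a (by norm_num)) (Int.emod_lt_of_pos a (by norm_num))
    (Int.emod_nonneg b (by norm_num)) (Int.emod_lt_of_pos b (by norm_num))
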